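-- pv_equiv track=rewrite | github.com/pypi-data/pypi-mirror-371 | packages/yycli/yycli-0.0.10-py3-none-any.whl/yycli/commands/confuse.py | _confuse
-- ===== SOURCE A (Python) =====
-- from collections.abc import Iterable
--
-- def _bit_mask(block_size: int, shift: int):
--     """get bit mask
--     """
--     return ((1 << block_size) - 1) << (shift * block_size)
--
-- def _move_bits(number: int, block_size: int, pos_a: int, pos_b: int):
--     """move bits
--     """
--     mask_a = _bit_mask(block_size, pos_a)
--     mask_b = _bit_mask(block_size, pos_b)
--     if pos_a > pos_b:
--         return ((number & mask_a) >> ((pos_a - pos_b) * block_size)) & mask_b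
--     if pos_a < pos_b:
--         return ((number & mask_a) << ((pos_b - pos_a) * block_size)) & mask_b
--     return number & mask_a
--
-- def _confuse(number: int, magic: int, block_size: int,
--              rules: Iterable[tuple[int, int]], expand_mask: int):
--     """confuse number
--     """
--     result = 0
--     for pos_a, pos_b in rules:
--         result |= _move_bits(number, block_size, pos_a, pos_b)
--
--     result |= number & expand_mask
--     result ^= magic
--
--     return result
-- ===== SOURCE B (Python) =====
-- def _confuse(number: int, magic: int, block_size: int, rules, expand_mask: int):
--     """confuse number: decompose once into base-2**block_size digits along the
--     sorted distinct source positions (a single sequential divmod walk), then a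
--     placement pass over the rules; no per-rule masks or shift branches."""
--     rules = list(rules)
--     base = 1 << block_size
--     blocks = {}
--     n = number
--     prev = 0
--     for pos in sorted({a for a, _ in rules}):
--         n //= base ** (pos - prev)
--         blocks[pos] = n % base
--         prev = pos
--     result = 0
--     for a, b in rules:
--         result |= blocks[a] << b * block_size
--     result |= number & expand_mask
--     return result ^ magic
-- ===== Notes on version B (the rewrite author's own statement) =====
-- stated objective: alternative
-- what changed: B replaces A's per-rule mask-and-three-way-shift moves by a staged algorithm: one sequential divmod walk along the sorted distinct source positions decomposes the number once into a dict of base-2**block_size digits (each step shrinks the working number instead of re-masking the full-width number per rule), then a placement pass ORs each stored digit into its target slot; the masks, helpers and pos_a/pos_b branch disappear.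
-- outside the precondition, e.g. on _confuse(5, 3, 0, [(-1, 0)], 6): A returns 7, B raises TypeError
import Mathlib
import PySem

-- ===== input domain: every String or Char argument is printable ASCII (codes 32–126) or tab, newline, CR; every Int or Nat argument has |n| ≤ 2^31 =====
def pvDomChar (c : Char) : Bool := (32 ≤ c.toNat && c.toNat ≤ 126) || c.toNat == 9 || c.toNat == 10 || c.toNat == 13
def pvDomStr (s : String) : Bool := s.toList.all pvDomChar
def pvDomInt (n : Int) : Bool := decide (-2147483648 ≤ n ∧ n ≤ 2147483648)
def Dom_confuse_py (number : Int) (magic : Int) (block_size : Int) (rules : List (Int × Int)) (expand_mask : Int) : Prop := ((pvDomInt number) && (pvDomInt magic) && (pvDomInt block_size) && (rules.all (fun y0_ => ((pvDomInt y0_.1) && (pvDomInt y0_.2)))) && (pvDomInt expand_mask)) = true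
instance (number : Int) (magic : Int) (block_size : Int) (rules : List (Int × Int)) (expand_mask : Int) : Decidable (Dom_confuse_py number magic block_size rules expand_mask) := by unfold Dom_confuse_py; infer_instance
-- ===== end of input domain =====

-- B replaces A's per-rule mask-and-three-way-shift moves by a staged algorithm: one
-- sequential divmod walk along the sorted distinct source positions that decomposes the
-- number once into a dict of base-2^block_size digits, then a placement pass over the
-- rules; objective: alternative.

-- ===== PORT A =====
-- .toNat on the shift counts is exact under Pre_confuse_py (Python raises on a negative shift count).
def pv_bit_mask (block_size : Int) (shift : Int) : Int :=
  (((1 : Int) <<< block_size.toNat) - 1) <<< (shift * block_size).toNat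

def pv_move_bits (number : Int) (block_size : Int) (pos_a : Int) (pos_b : Int) : Int :=
  let mask_a := pv_bit_mask block_size pos_a
  let mask_b := pv_bit_mask block_size pos_b
  if pos_b < pos_a then
    PySem.Int.band ((PySem.Int.band number mask_a) >>> ((pos_a - pos_b) * block_size).toNat) mask_b
  else if pos_a < pos_b then
    PySem.Int.band ((PySem.Int.band number mask_a) <<< ((pos_b - pos_a) * block_size).toNat) mask_b
  else PySem.Int.band number mask_a

def confuse_py (number : Int) (magic : Int) (block_size : Int) (rules : List (Int × Int)) (expand_mask : Int) : Int :=
  let result := rules.foldl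
    (fun result rule => PySem.Int.bor result (pv_move_bits number block_size rule.1 rule.2)) 0
  let result := PySem.Int.bor result (PySem.Int.band number expand_mask)
  PySem.Int.bxor result magic

-- ===== PORT B =====
-- one step of Source B's divmod walk: state = (blocks dict, current n, previous position);
-- `(pos - prev).toNat` and `base ^ _` are exact under Pre_confuse_py (positions sorted, ≥ 0).
def pv_walk_step (base : Int) (st : PySem.Dict Int Int × Int × Int) (pos : Int) :
    PySem.Dict Int Int × Int × Int :=
  let n := PySem.Int.floordiv st.2.1 (base ^ (pos - st.2.2).toNat)
  (st.1.insert pos (PySem.Int.mod n base), n, pos)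

def confuse_py_alt (number : Int) (magic : Int) (block_size : Int) (rules : List (Int × Int)) (expand_mask : Int) : Int :=
  let base := (1 : Int) <<< block_size.toNat
  let srcs := PySem.List.sorted (PySem.Set.ofList (rules.map Prod.fst)) (fun x => x)
  let st := srcs.foldl (pv_walk_step base) (PySem.Dict.empty, number, 0)
  -- blocks[a]: the key is always present (srcs are exactly the source positions), so getD 0 is exact
  let result := rules.foldl
    (fun result rule =>
      PySem.Int.bor result ((st.1.getD rule.1 0) <<< (rule.2 * block_size).toNat)) 0
  let result := PySem.Int.bor result (PySem.Int.band number expand_mask)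
  PySem.Int.bxor result magic

-- ===== PRECONDITION & SPEC =====
-- A raises (negative shift count) unless block_size ≥ 0 and every pos*block_size ≥ 0; in the
-- degenerate case block_size = 0 A also returns on rules with a NEGATIVE source position (every
-- mask is empty), which Pre_ excludes: B's digit-walk raises TypeError there (see claim cites).
def Pre_confuse_py (number : Int) (magic : Int) (block_size : Int) (rules : List (Int × Int)) (expand_mask : Int) : Prop :=
  0 ≤ block_size ∧ ∀ rule ∈ rules, 0 ≤ rule.1 ∧ 0 ≤ rule.2 * block_size
instance (number : Int) (magic : Int) (block_size : Int) (rules : List (Int × Int)) (expand_mask : Int) : Decidable (Pre_confuse_py number magic block_size rules expand_mask) := by unfold Pre_confuse_py; infer_instance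

def pvWitness_confuse_py : Int × Int × Int × (List (Int × Int)) × Int := (21, 9, 2, [(0, 1), (1, 0)], 12)

def Spec_confuse_py (number : Int) (magic : Int) (block_size : Int) (rules : List (Int × Int)) (expand_mask : Int) (out : Int) : Prop := out = confuse_py_alt number magic block_size rules expand_mask
instance (number : Int) (magic : Int) (block_size : Int) (rules : List (Int × Int)) (expand_mask : Int) (out : Int) : Decidable (Spec_confuse_py number magic block_size rules expand_mask out) := by unfold Spec_confuse_py; infer_instance

-- ===== CLAIM (what is proved, stated in full; the proofs are below) =====
def Claim_equal_confuse_py : Prop := ∀ (number : Int) (magic : Int) (block_size : Int) (rules : List (Int × Int)) (expand_mask : Int), Dom_confuse_py number magic block_size rules expand_mask → Pre_confuse_py number magic block_size rules expand_mask → Spec_confuse_py number magic block_size rules expand_mask (confuse_py number magic block_size rules expand_mask)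

-- ===== LEMMAS AND PROOFS =====

-- bit-level core, on Nat: AND with a contiguous mask of k bits at offset s
lemma pv_nat_and_mask (n k s : Nat) :
    n &&& ((2 ^ k - 1) <<< s) = ((n >>> s) % 2 ^ k) <<< s := by
  apply Nat.eq_of_testBit_eq
  intro i
  simp only [Nat.testBit_and, Nat.testBit_shiftLeft, Nat.testBit_mod_two_pow,
    Nat.testBit_two_pow_sub_one, Nat.testBit_shiftRight]
  by_cases hsi : s ≤ i
  · have h : s + (i - s) = i := by omega
    simp [ge_iff_le, hsi, h, Bool.and_comm]
  · simp [ge_iff_le, hsi]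

lemma pv_negSucc_divmod (m b : Nat) (hb : 0 < b) :
    (Int.negSucc m) / (b : Int) = Int.negSucc (m / b) ∧
    (Int.negSucc m) % (b : Int) = ((b - 1 - m % b : Nat) : Int) := by
  have hb' : (0 : Int) < (b : Int) := by exact_mod_cast hb
  have hm : m % b < b := Nat.mod_lt _ hb
  have h2 : (b : Int) * ((m / b : Nat) : Int) + ((m % b : Nat) : Int) = (m : Int) := by
    exact_mod_cast Nat.div_add_mod m b
  have h1 : ((b - 1 - m % b : Nat) : Int) = (b : Int) - 1 - ((m % b : Nat) : Int) := by omega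
  refine (Int.ediv_emod_unique (a := Int.negSucc m) (b := (b : Int))
      (r := ((b - 1 - m % b : Nat) : Int)) (q := Int.negSucc (m / b)) hb').mpr
    ⟨?_, by positivity, by omega⟩
  rw [h1, Int.negSucc_eq, Int.negSucc_eq]
  nlinarith [h2]

-- A's masked AND, arithmetically: the k-bit block of x at offset s, put back at offset s.
lemma pv_band_mask (x : Int) (k s : Nat) :
    PySem.Int.band x ((2 ^ k - 1) * 2 ^ s) = x / 2 ^ s % 2 ^ k * 2 ^ s := by
  have h1 : (1 : Nat) ≤ 2 ^ k := Nat.one_le_two_pow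
  have hcast : ((2 : Int) ^ k - 1) * 2 ^ s = (((2 ^ k - 1) * 2 ^ s : Nat) : Int) := by
    push_cast [h1]; ring
  have hmask : (2 ^ k - 1) * 2 ^ s = (2 ^ k - 1) <<< s := (Nat.shiftLeft_eq _ _).symm
  have hps : (0:Nat) < 2 ^ s := Nat.two_pow_pos _
  have hpk : (0:Nat) < 2 ^ k := Nat.two_pow_pos _
  have hcs : (((2:Nat) ^ s : Nat) : Int) = (2:Int) ^ s := by push_cast; ring
  have hck : (((2:Nat) ^ k : Nat) : Int) = (2:Int) ^ k := by push_cast; ring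
  cases x with
  | ofNat n =>
    rw [hcast, Int.ofNat_eq_natCast, PySem.Int.band_natCast]
    rw [hmask, pv_nat_and_mask, Nat.shiftLeft_eq, Nat.shiftRight_eq_div_pow]
    push_cast
    rfl
  | negSucc n =>
    have hns : ¬ (0 : Int) ≤ Int.negSucc n := not_le.mpr (Int.negSucc_lt_zero n)
    have hneg : -(Int.negSucc n) - 1 = (n : Int) := by rw [Int.negSucc_eq]; ring
    rw [hcast]
    simp only [PySem.Int.band]
    rw [if_neg hns, if_pos (by positivity), hneg, Int.toNat_natCast, Int.toNat_natCast]
    have hand : ((2 ^ k - 1) * 2 ^ s) &&& n = (n / 2 ^ s % 2 ^ k) * 2 ^ s := by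
      rw [Nat.and_comm, hmask, pv_nat_and_mask, Nat.shiftLeft_eq, Nat.shiftRight_eq_div_pow]
    have hd := pv_negSucc_divmod n (2 ^ s) hps
    have hd2 := pv_negSucc_divmod (n / 2 ^ s) (2 ^ k) hpk
    rw [show (2:Int) ^ s = (((2:Nat) ^ s : Nat) : Int) from hcs.symm, hd.1,
      show (2:Int) ^ k = (((2:Nat) ^ k : Nat) : Int) from hck.symm, hd2.2]
    rw [hand]
    have hlt : n / 2 ^ s % 2 ^ k < 2 ^ k := Nat.mod_lt _ hpk
    rw [show (2 ^ k - 1) * 2 ^ s - n / 2 ^ s % 2 ^ k * 2 ^ s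
        = (2 ^ k - 1 - n / 2 ^ s % 2 ^ k) * 2 ^ s from by simp [Nat.sub_mul]]
    push_cast [show n / 2 ^ s % 2 ^ k ≤ 2 ^ k - 1 from by omega, h1]
    ring

-- per-rule value of A's block mover, arithmetically, under A's shift-count preconditions
lemma pv_move_eq (x bs pa pb : Int) (hbs : 0 ≤ bs) (ha : 0 ≤ pa * bs) (hb : 0 ≤ pb * bs) :
    pv_move_bits x bs pa pb
      = x / 2 ^ (pa * bs).toNat % 2 ^ bs.toNat * 2 ^ (pb * bs).toNat := by
  have hblk0 : 0 ≤ x / 2 ^ (pa * bs).toNat % 2 ^ bs.toNat :=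
    Int.emod_nonneg _ (by positivity)
  have hblklt : x / 2 ^ (pa * bs).toNat % 2 ^ bs.toNat < 2 ^ bs.toNat :=
    Int.emod_lt_of_pos _ (by positivity)
  have habs : ∀ s : Nat,
      PySem.Int.band ((x / 2 ^ (pa * bs).toNat % 2 ^ bs.toNat) * 2 ^ s)
        (((2 : Int) ^ bs.toNat - 1) * 2 ^ s)
      = (x / 2 ^ (pa * bs).toNat % 2 ^ bs.toNat) * 2 ^ s := by
    intro s
    rw [pv_band_mask, Int.mul_ediv_cancel _ (by positivity : (2 : Int) ^ s ≠ 0),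
      Int.emod_eq_of_lt hblk0 hblklt]
  have hmask : ∀ p : Int, pv_bit_mask bs p = ((2 : Int) ^ bs.toNat - 1) * 2 ^ ((p * bs).toNat) := by
    intro p
    unfold pv_bit_mask
    rw [Int.shiftLeft_eq, Int.shiftLeft_eq]
    ring
  simp only [pv_move_bits]
  rw [hmask pa, hmask pb]
  by_cases h1 : pb < pa
  · rw [if_pos h1]
    rw [pv_band_mask x bs.toNat (pa * bs).toNat]
    have hd : 0 ≤ (pa - pb) * bs := mul_nonneg (by omega) hbs
    have hdd : (pa - pb) * bs = pa * bs - pb * bs := by ring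
    have hsum : (pa * bs).toNat = (pb * bs).toNat + ((pa - pb) * bs).toNat := by omega
    have hshift : ((x / 2 ^ (pa * bs).toNat % 2 ^ bs.toNat) * 2 ^ (pa * bs).toNat)
        >>> ((pa - pb) * bs).toNat
        = (x / 2 ^ (pa * bs).toNat % 2 ^ bs.toNat) * 2 ^ (pb * bs).toNat := by
      rw [Int.shiftRight_eq_div_pow,
        show (((2:Nat) ^ ((pa - pb) * bs).toNat : Nat) : Int) = (2:Int) ^ ((pa - pb) * bs).toNat
          from by push_cast; ring,
        hsum, pow_add, ← mul_assoc,
        Int.mul_ediv_cancel _ (by positivity : (2 : Int) ^ ((pa - pb) * bs).toNat ≠ 0)]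
    rw [hshift, habs]
  · rw [if_neg h1]
    by_cases h2 : pa < pb
    · rw [if_pos h2]
      rw [pv_band_mask x bs.toNat (pa * bs).toNat]
      have hd : 0 ≤ (pb - pa) * bs := mul_nonneg (by omega) hbs
      have hdd : (pb - pa) * bs = pb * bs - pa * bs := by ring
      have hsum : (pb * bs).toNat = (pa * bs).toNat + ((pb - pa) * bs).toNat := by omega
      have hshift : ((x / 2 ^ (pa * bs).toNat % 2 ^ bs.toNat) * 2 ^ (pa * bs).toNat)
          <<< ((pb - pa) * bs).toNat
          = (x / 2 ^ (pa * bs).toNat % 2 ^ bs.toNat) * 2 ^ (pb * bs).toNat := by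
        rw [Int.shiftLeft_eq, hsum, pow_add]
        ring
      rw [hshift, habs]
    · rw [if_neg h2]
      have heq : pa = pb := by omega
      rw [heq, pv_band_mask x bs.toNat (pb * bs).toNat]

-- invariant of B's divmod walk: after folding a sorted list of positions ≥ prev ≥ 0,
-- the dict holds, at every position of the list, exactly that base-digit of `number`.
lemma pv_walk_inv (base number : Int) (hbase : 0 < base) :
    ∀ (l : List Int) (d : PySem.Dict Int Int) (prev : Int), 0 ≤ prev →
      (∀ x ∈ l, prev ≤ x) → l.Pairwise (· ≤ ·) → ∀ p : Int,
      (l.foldl (pv_walk_step base) (d, number / base ^ prev.toNat, prev)).1.get? p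
        = if p ∈ l then some (PySem.Int.mod (number / base ^ p.toNat) base) else d.get? p := by
  intro l
  induction l with
  | nil => intro d prev _ _ _ p; simp
  | cons h t ih =>
    intro d prev hprev hlb hpw p
    have hph : prev ≤ h := hlb h (List.mem_cons_self)
    have hstep : pv_walk_step base (d, number / base ^ prev.toNat, prev) h
        = (d.insert h (PySem.Int.mod (number / base ^ h.toNat) base),
           number / base ^ h.toNat, h) := by
      have hdiv : PySem.Int.floordiv (number / base ^ prev.toNat) (base ^ (h - prev).toNat)
          = number / base ^ h.toNat := by
        rw [PySem.Int.floordiv_eq_ediv_of_pos (by positivity),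
          Int.ediv_ediv_of_nonneg (by positivity : (0:Int) ≤ base ^ prev.toNat),
          ← pow_add, show prev.toNat + (h - prev).toNat = h.toNat from by omega]
      simp only [pv_walk_step, hdiv]
    rw [List.foldl_cons, hstep,
      ih _ h (by omega) (fun x hx => (List.pairwise_cons.mp hpw).1 x hx) (List.pairwise_cons.mp hpw).2 p]
    by_cases hpt : p ∈ t
    · simp [hpt]
    · by_cases hph' : p = h
      · subst hph'
        simp [hpt, PySem.Dict.get?_insert_self]
      · simp [hpt, hph', PySem.Dict.get?_insert_of_ne d _ hph']

-- ===== VERDICT (by name: the statement is the Claim_ definition above) =====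
theorem confuse_py_spec : Claim_equal_confuse_py := by
  intro number magic block_size rules expand_mask _hdom hpre
  obtain ⟨hbs, hrules⟩ := hpre
  unfold Spec_confuse_py confuse_py confuse_py_alt
  set base := (1 : Int) <<< block_size.toNat with hbasedef
  have hbase2 : base = (2 : Int) ^ block_size.toNat := by
    rw [hbasedef, Int.shiftLeft_eq]; ring
  have hbasepos : 0 < base := by rw [hbase2]; positivity
  set srcs := PySem.List.sorted (PySem.Set.ofList (rules.map Prod.fst)) (fun x => x) with hsrcs
  have hmem : ∀ x ∈ srcs, x ∈ rules.map Prod.fst := by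
    intro x hx
    rw [hsrcs, PySem.List.mem_sorted, PySem.Set.mem_ofList] at hx
    exact hx
  have hnn : ∀ x ∈ srcs, (0 : Int) ≤ x := by
    intro x hx
    obtain ⟨rule, hr, hrx⟩ := List.mem_map.mp (hmem x hx)
    exact hrx ▸ (hrules rule hr).1
  have hpw : srcs.Pairwise (· ≤ ·) := PySem.List.sorted_pairwise _ (fun x => x)
  have hwalk := pv_walk_inv base number hbasepos srcs PySem.Dict.empty 0 le_rfl hnn hpw
  rw [show number / base ^ (0 : Int).toNat = number from by simp] at hwalk
  have hfold : rules.foldl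
      (fun result rule => PySem.Int.bor result (pv_move_bits number block_size rule.1 rule.2)) 0
    = rules.foldl
      (fun result rule =>
        PySem.Int.bor result
          (((srcs.foldl (pv_walk_step base) (PySem.Dict.empty, number, 0)).1.getD rule.1 0)
            <<< (rule.2 * block_size).toNat)) 0 := by
    apply PySem.List.foldl_congr_mem
    intro acc rule hmemr
    obtain ⟨ha, hb⟩ := hrules rule hmemr
    have hin : rule.1 ∈ srcs := by
      rw [hsrcs, PySem.List.mem_sorted, PySem.Set.mem_ofList]
      exact List.mem_map.mpr ⟨rule, hmemr, rfl⟩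
    have hget := hwalk rule.1
    rw [if_pos hin] at hget
    have hgetD : (srcs.foldl (pv_walk_step base) (PySem.Dict.empty, number, 0)).1.getD rule.1 0
        = PySem.Int.mod (number / base ^ (rule.1).toNat) base := by
      simp [PySem.Dict.getD, hget]
    rw [hgetD]
    have hpowa : base ^ (rule.1).toNat = (2 : Int) ^ ((rule.1 * block_size).toNat) := by
      obtain ⟨m, hm⟩ := Int.eq_ofNat_of_zero_le ha
      obtain ⟨k, hk⟩ := Int.eq_ofNat_of_zero_le hbs
      rw [hbase2, ← pow_mul]
      congr 1
      rw [hm, hk, ← Nat.cast_mul]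
      simp only [Int.toNat_natCast]
      exact Nat.mul_comm k m
    rw [pv_move_eq number block_size rule.1 rule.2 hbs (mul_nonneg ha hbs) hb,
      hpowa, PySem.Int.mod_eq_emod_of_pos hbasepos, hbase2, Int.shiftLeft_eq]
  rw [hfold]
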